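-- pv_equiv track=rewrite | github.com/Desmazing/kata-training | build_cube_pile.py | find_nb2
-- ===== SOURCE A (Python) =====
-- def find_nb2(m):
--     total = 0
--     counter = 0
--     for i in range(1, m):
--         total += i ** 3
--         counter += 1
--         if total == m: return counter
--     return -1
-- ===== SOURCE B (Python) =====
-- def _isqrt(n):
--     # Newton's method integer square root; called only with n >= 0
--     if n <= 1:
--         return n
--     x = n // 2
--     while True:
--         y = (x + n // x) // 2
--         if y < x:
--             x = y
--         else:
--             return x
--
--
-- def find_nb2(m):
--     if m <= 1:
--         return 1 if m == 1 else -1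
--     s = _isqrt(m)
--     if s * s != m:
--         return -1
--     k = _isqrt(8 * s + 1)
--     if k * k != 8 * s + 1:
--         return -1
--     return (k - 1) // 2
-- ===== Notes on version B (the rewrite author's own statement) =====
-- stated objective: faster
-- what changed: Replaces the O(m) cube-summing loop by the closed form (n(n+1)/2)^2 = m, inverted with two Newton integer square roots, so the answer is computed in O(log m) arithmetic steps.
-- intended difference: For m = 1 A returns -1 because its loop range(1, m) is empty, although 1^3 = 1 means the intended answer is 1; B returns 1 there. — e.g. on find_nb2(1): A returns -1, B returns 1
import Mathlib
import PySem

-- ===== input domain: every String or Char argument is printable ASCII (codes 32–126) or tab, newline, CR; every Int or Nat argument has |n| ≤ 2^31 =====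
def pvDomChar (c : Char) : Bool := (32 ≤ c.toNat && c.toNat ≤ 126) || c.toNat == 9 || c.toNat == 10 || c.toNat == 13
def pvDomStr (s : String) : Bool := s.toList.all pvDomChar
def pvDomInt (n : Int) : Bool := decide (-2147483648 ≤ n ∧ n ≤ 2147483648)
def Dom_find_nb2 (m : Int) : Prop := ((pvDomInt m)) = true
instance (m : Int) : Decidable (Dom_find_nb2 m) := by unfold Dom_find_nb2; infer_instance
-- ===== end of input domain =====

-- B replaces A's O(m) cube-summing loop by the closed form (n(n+1)/2)^2 = m inverted with
-- Newton integer square roots (objective: faster, asymptotic).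

-- ===== PORT A =====
-- the for-loop with its early return, as structural recursion over list(range(1, m))
def find_nb2_loop (m total counter : Int) : List Int → Int
  | [] => -1
  | i :: rest =>
    let total := total + i ^ 3
    let counter := counter + 1
    if total = m then counter else find_nb2_loop m total counter rest

def find_nb2 (m : Int) : Int :=
  find_nb2_loop m 0 0 (PySem.List.pyRange 1 m 1)

-- ===== PORT B =====
-- Source B's _isqrt while-loop; its argument is always a nonnegative int, so Nat division here
-- is exactly Python's floor division on that domain
def isqrtIter (n x : Nat) : Nat :=
  let y := (x + n / x) / 2
  if _h : y < x then isqrtIter n y else x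
termination_by x

def isqrtNat (n : Nat) : Nat :=
  if n ≤ 1 then n else isqrtIter n (n / 2)

def find_nb2_alt (m : Int) : Int :=
  if m ≤ 1 then (if m = 1 then 1 else -1)
  else
    let s := isqrtNat m.toNat
    if (s : Int) * s ≠ m then -1
    else
      let k := isqrtNat (8 * s + 1)
      if k * k ≠ 8 * s + 1 then -1
      else ((k : Int) - 1) / 2

-- ===== PRECONDITION & SPEC =====
-- For m = 1 A returns -1 (its loop range(1, m) is empty) although 1^3 = 1, so the intended
-- answer is 1; B returns 1 there.
def D_find_nb2 (m : Int) : Prop := m = 1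
instance (m : Int) : Decidable (D_find_nb2 m) := by unfold D_find_nb2; infer_instance

def Spec_find_nb2 (m : Int) (out : Int) : Prop := ¬ D_find_nb2 m → out = find_nb2_alt m
instance (m : Int) (out : Int) : Decidable (Spec_find_nb2 m out) := by unfold Spec_find_nb2; infer_instance

def pvDiffWitness_find_nb2 : Int := 1
def pvDiffWitnessOut_find_nb2 : Int × Int := (-1, 1)

-- ===== CLAIM (what is proved, stated in full; the proofs are below) =====
def Claim_unchanged_find_nb2 : Prop := ∀ (m : Int), Dom_find_nb2 m → Spec_find_nb2 m (find_nb2 m)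
def Claim_changed_find_nb2 : Prop := Dom_find_nb2 (pvDiffWitness_find_nb2) ∧ D_find_nb2 (pvDiffWitness_find_nb2) ∧ find_nb2 (pvDiffWitness_find_nb2) = pvDiffWitnessOut_find_nb2.1 ∧ find_nb2_alt (pvDiffWitness_find_nb2) = pvDiffWitnessOut_find_nb2.2 ∧ pvDiffWitnessOut_find_nb2.1 ≠ pvDiffWitnessOut_find_nb2.2
def Claim_exact_find_nb2 : Prop := ∀ (m : Int), Dom_find_nb2 m → D_find_nb2 m → find_nb2 m ≠ find_nb2_alt m

-- ===== LEMMAS AND PROOFS =====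

-- triangular numbers, recursively (so 2 * tri n = n * (n + 1))
def tri : Nat → Nat
  | 0 => 0
  | n + 1 => tri n + (n + 1)

theorem two_tri (n : Nat) : 2 * tri n = n * (n + 1) := by
  induction n with
  | zero => rfl
  | succ k ih => unfold tri; nlinarith [ih]

theorem tri_cube_step (n : Nat) : tri (n + 1) ^ 2 = tri n ^ 2 + (n + 1) ^ 3 := by
  rw [show tri (n + 1) = tri n + (n + 1) from rfl]
  nlinarith [two_tri n]

theorem tri_strictMono : StrictMono tri := by
  have : ∀ n, tri n < tri (n + 1) := fun n => show tri n < tri n + (n + 1) by omega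
  exact strictMono_nat_of_lt_succ this

theorem tri_ge (n : Nat) : n ≤ tri n := by
  induction n with
  | zero => exact Nat.le_refl 0
  | succ k ih => exact show k + 1 ≤ tri k + (k + 1) by omega

-- for n ≥ 2 the solution index is strictly below m = tri n ^ 2
theorem lt_tri_sq (n : Nat) (hn : 2 ≤ n) : n < tri n ^ 2 := by
  have h1 := tri_ge n
  nlinarith

-- ---- Newton isqrt spec ----
theorem isqrtIter_eq (n x : Nat) : isqrtIter n x = Nat.sqrt.iter n x := by
  induction x using isqrtIter.induct (n := n) with
  | case1 x y hlt ih =>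
    rw [isqrtIter, Nat.sqrt.iter]
    split
    · exact ih
    · omega
  | case2 x y hnl =>
    rw [isqrtIter, Nat.sqrt.iter]
    split
    · omega
    · rfl

theorem isqrtNat_spec (n : Nat) :
    isqrtNat n * isqrtNat n ≤ n ∧ n < (isqrtNat n + 1) * (isqrtNat n + 1) := by
  unfold isqrtNat
  split
  · rename_i h
    interval_cases n <;> simp
  · rename_i h
    rw [isqrtIter_eq]
    refine ⟨Nat.sqrt.iter_sq_le n (n / 2), Nat.sqrt.lt_iter_succ_sq n (n / 2) ?_⟩
    have hg : 1 ≤ n / 2 := by omega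
    have h2 : n ≤ 2 * (n / 2) + 1 := by omega
    nlinarith [hg, h2]

theorem isqrtNat_of_sq (t : Nat) : isqrtNat (t * t) = t := by
  obtain ⟨h1, h2⟩ := isqrtNat_spec (t * t)
  set s := isqrtNat (t * t)
  have hle : s ≤ t := by nlinarith
  have hge : t ≤ s := by nlinarith
  omega

theorem cast_sq (t : Nat) : ((t : Int)) ^ 2 = ((t ^ 2 : Nat) : Int) := by push_cast; ring

theorem sol_cast (m : Int) (n : Nat) (hsol : ((tri n : Int)) ^ 2 = m) :
    m = ((tri n ^ 2 : Nat) : Int) := by rw [← hsol]; exact (cast_sq (tri n)).symm ▸ rfl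

-- ---- A-side loop characterisation ----
theorem loopA_found (m : Int) (n : Nat) (hn : 2 ≤ n) (hsol : ((tri n : Int)) ^ 2 = m) :
    ∀ j : Nat, j < n →
      find_nb2_loop m (((tri j : Int)) ^ 2) (j : Int) (PySem.List.pyRange ((j : Int) + 1) m 1) = n := by
  suffices H : ∀ d j : Nat, j < n → n - j = d + 1 →
      find_nb2_loop m (((tri j : Int)) ^ 2) (j : Int) (PySem.List.pyRange ((j : Int) + 1) m 1) = n by
    intro j hj
    exact H (n - j - 1) j hj (by omega)
  intro d
  induction d with
  | zero =>
    intro j hj hd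
    have hjn : j + 1 = n := by omega
    have hlt : (j : Int) + 1 < m := by
      have h1 := lt_tri_sq n hn
      have h2 := sol_cast m n hsol
      omega
    rw [PySem.List.pyRange_one_cons hlt]
    show (if ((tri j : Int)) ^ 2 + ((j : Int) + 1) ^ 3 = m then (j : Int) + 1
          else find_nb2_loop m (((tri j : Int)) ^ 2 + ((j : Int) + 1) ^ 3) ((j : Int) + 1)
            (PySem.List.pyRange ((j : Int) + 1 + 1) m 1)) = n
    have htot : ((tri j : Int)) ^ 2 + ((j : Int) + 1) ^ 3 = ((tri (j + 1) : Int)) ^ 2 := by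
      have := tri_cube_step j
      push_cast
      push_cast at this
      linarith
    rw [htot, hjn, hsol]
    simp
    omega
  | succ d ih =>
    intro j hj hd
    have hjn : j + 1 < n := by omega
    have hlt : (j : Int) + 1 < m := by
      have h1 := lt_tri_sq n hn
      have h2 := sol_cast m n hsol
      omega
    rw [PySem.List.pyRange_one_cons hlt]
    show (if ((tri j : Int)) ^ 2 + ((j : Int) + 1) ^ 3 = m then (j : Int) + 1
          else find_nb2_loop m (((tri j : Int)) ^ 2 + ((j : Int) + 1) ^ 3) ((j : Int) + 1)
            (PySem.List.pyRange ((j : Int) + 1 + 1) m 1)) = n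
    have htot : ((tri j : Int)) ^ 2 + ((j : Int) + 1) ^ 3 = ((tri (j + 1) : Int)) ^ 2 := by
      have := tri_cube_step j
      push_cast
      push_cast at this
      linarith
    have hne : ((tri (j + 1) : Int)) ^ 2 ≠ m := by
      have hlt2 : tri (j + 1) < tri n := tri_strictMono hjn
      have hsq : tri (j + 1) ^ 2 < tri n ^ 2 := Nat.pow_lt_pow_left hlt2 (by norm_num)
      have h2 := sol_cast m n hsol
      rw [cast_sq]
      omega
    rw [htot, if_neg hne]
    have := ih (j + 1) hjn (by omega)
    push_cast at this ⊢
    convert this using 3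

-- ---- A-side: no solution at all ⇒ -1, by fuel on the remaining range length ----
theorem loopA_none (m : Int) (hns : ∀ n : Nat, ((tri n : Int)) ^ 2 ≠ m) :
    ∀ fuel j : Nat, (m - (j : Int) - 1).toNat ≤ fuel →
      find_nb2_loop m (((tri j : Int)) ^ 2) (j : Int) (PySem.List.pyRange ((j : Int) + 1) m 1) = -1 := by
  intro fuel
  induction fuel with
  | zero =>
    intro j hf
    have : m ≤ (j : Int) + 1 := by omega
    rw [PySem.List.pyRange_one_eq_nil this]
    rfl
  | succ f ih =>
    intro j hf
    by_cases hlt : (j : Int) + 1 < m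
    · rw [PySem.List.pyRange_one_cons hlt]
      show (if ((tri j : Int)) ^ 2 + ((j : Int) + 1) ^ 3 = m then (j : Int) + 1
            else find_nb2_loop m (((tri j : Int)) ^ 2 + ((j : Int) + 1) ^ 3) ((j : Int) + 1)
              (PySem.List.pyRange ((j : Int) + 1 + 1) m 1)) = -1
      have htot : ((tri j : Int)) ^ 2 + ((j : Int) + 1) ^ 3 = ((tri (j + 1) : Int)) ^ 2 := by
        have := tri_cube_step j
        push_cast
        push_cast at this
        linarith
      rw [htot, if_neg (hns (j + 1))]
      have := ih (j + 1) (by omega)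
      push_cast at this ⊢
      convert this using 3
    · rw [PySem.List.pyRange_one_eq_nil (by omega)]
      rfl

-- ---- B-side ----
theorem alt_found (m : Int) (hm : 2 ≤ m) (n : Nat) (hsol : ((tri n : Int)) ^ 2 = m) :
    find_nb2_alt m = n := by
  have hn : 2 ≤ n := by
    by_contra h
    interval_cases n <;> simp [tri] at hsol <;> omega
  have hmt : m.toNat = tri n * tri n := by
    have h2 := sol_cast m n hsol
    have h3 : tri n ^ 2 = tri n * tri n := by ring
    omega
  have h8 : 8 * tri n + 1 = (2 * n + 1) * (2 * n + 1) := by nlinarith [two_tri n]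
  have hk : isqrtNat (8 * tri n + 1) = 2 * n + 1 := by rw [h8, isqrtNat_of_sq]
  simp only [find_nb2_alt]
  rw [if_neg (by omega : ¬ m ≤ 1), hmt, isqrtNat_of_sq]
  rw [if_neg (by rw [not_ne_iff, ← hsol]; ring)]
  rw [hk, if_neg (by omega : ¬ (2 * n + 1) * (2 * n + 1) ≠ 8 * tri n + 1)]
  push_cast
  omega

theorem alt_none (m : Int) (hm : 2 ≤ m) (hns : ∀ n : Nat, ((tri n : Int)) ^ 2 ≠ m) :
    find_nb2_alt m = -1 := by
  simp only [find_nb2_alt]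
  rw [if_neg (by omega : ¬ m ≤ 1)]
  by_cases h1 : ((isqrtNat m.toNat : Int)) * (isqrtNat m.toNat) ≠ m
  · rw [if_pos h1]
  · rw [if_neg h1]
    push_neg at h1
    by_cases h2 : isqrtNat (8 * isqrtNat m.toNat + 1) * isqrtNat (8 * isqrtNat m.toNat + 1)
        ≠ 8 * isqrtNat m.toNat + 1
    · rw [if_pos h2]
    · exfalso
      push_neg at h2
      rcases Nat.even_or_odd (isqrtNat (8 * isqrtNat m.toNat + 1)) with he | ho
      · obtain ⟨b, hb⟩ := he
        rw [hb] at h2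
        have hexp : (b + b) * (b + b) = 4 * (b * b) := by ring
        omega
      · obtain ⟨a, ha⟩ := ho
        rw [ha] at h2
        have hexp : (2 * a + 1) * (2 * a + 1) = 4 * (a * a) + 4 * a + 1 := by ring
        have h3 : a * a + a = 2 * isqrtNat m.toNat := by omega
        have h4 : tri a = isqrtNat m.toNat := by
          have h5 := two_tri a
          have h6 : a * (a + 1) = a * a + a := by ring
          omega
        exact hns a (by rw [h4]; nlinarith [h1])

-- ===== VERDICT (by name: the statement is the Claim_ definition above) =====
theorem find_nb2_spec : Claim_unchanged_find_nb2 := by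
  intro m _
  unfold Spec_find_nb2 D_find_nb2
  intro hd
  by_cases hm2 : m ≤ 1
  · have hA : find_nb2 m = -1 := by
      unfold find_nb2
      rw [PySem.List.pyRange_one_eq_nil (by omega : m ≤ 1)]
      rfl
    have hB : find_nb2_alt m = -1 := by
      simp only [find_nb2_alt]
      rw [if_pos hm2, if_neg hd]
    rw [hA, hB]
  · have hm : 2 ≤ m := by omega
    by_cases hex : ∃ n : Nat, ((tri n : Int)) ^ 2 = m
    · obtain ⟨n, hsol⟩ := hex
      have hn : 2 ≤ n := by
        by_contra h
        interval_cases n <;> simp [tri] at hsol <;> omega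
      have hA : find_nb2 m = n := by
        have h0 := loopA_found m n hn hsol 0 (by omega)
        unfold find_nb2
        convert h0 using 2
      rw [hA, alt_found m hm n hsol]
    · push_neg at hex
      have hA := loopA_none m hex (m - 1).toNat 0 (by omega)
      unfold find_nb2
      rw [alt_none m hm hex]
      convert hA using 2

theorem find_nb2_changed : Claim_changed_find_nb2 := by
  unfold Claim_changed_find_nb2; decide

theorem find_nb2_tight : Claim_exact_find_nb2 := by
  intro m _ hd
  unfold D_find_nb2 at hd; subst hd
  decide
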